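-- pv_equiv track=rewrite | github.com/Dr-Seagraves/qm2023-capstone-1st-row-team | code/generate_data_dictionary.py | infer_dtype
-- ===== SOURCE A (Python) =====
-- def infer_dtype(values: list[str]) -> str:
--     """Infer a simple dtype from a list of string values."""
--     non_empty = [v for v in values if v.strip()]
--     if not non_empty:
--         return "unknown"
--
--     # Try int
--     int_count = 0
--     float_count = 0
--     date_count = 0
--     for v in non_empty[:50]:
--         try:
--             int(v)
--             int_count += 1
--             continue
--         except ValueError:
--             pass
--         try:
--             float(v)
--             float_count += 1
--             continue
--         except ValueError:
--             pass
--         # Simple date heuristic: contains '-' and digits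
--         if len(v) >= 8 and "-" in v:
--             parts = v.split("-")
--             if len(parts) in (2, 3) and all(p.isdigit() for p in parts):
--                 date_count += 1
--
--     total = len(non_empty[:50])
--     if int_count == total:
--         return "integer"
--     if (int_count + float_count) == total:
--         return "float"
--     if date_count > total * 0.8:
--         return "date"
--     return "string"
-- ===== SOURCE B (Python) =====
-- def infer_dtype(values: list[str]) -> str:
--     """Infer a simple dtype via staged short-circuit passes over the sample."""
--     sample = [v for v in values if v.strip()][:50]
--     if not sample:
--         return "unknown"
--     if all(_is_int(v) for v in sample):
--         return "integer"
--     if all(_is_number(v) for v in sample):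
--         return "float"
--     dates = sum(1 for v in sample if not _is_number(v) and _is_dateish(v))
--     if dates > 0.8 * len(sample):
--         return "date"
--     return "string"
--
--
-- def _is_int(v):
--     try:
--         int(v)
--         return True
--     except ValueError:
--         return False
--
--
-- def _is_number(v):
--     if _is_int(v):
--         return True
--     try:
--         float(v)
--         return True
--     except ValueError:
--         return False
--
--
-- def _is_dateish(v):
--     if len(v) >= 8 and "-" in v:
--         parts = v.split("-")
--         return len(parts) in (2, 3) and all(p.isdigit() for p in parts)
--     return False
-- ===== Notes on version B (the rewrite author's own statement) =====
-- stated objective: simpler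
-- what changed: Replaces A's single counting loop (three hand-maintained counters with try/except/continue control flow and end-of-loop threshold tests) by staged short-circuit passes: all-int?, then all-numeric?, then a date tally taken only over the non-numeric values.
import Mathlib
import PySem

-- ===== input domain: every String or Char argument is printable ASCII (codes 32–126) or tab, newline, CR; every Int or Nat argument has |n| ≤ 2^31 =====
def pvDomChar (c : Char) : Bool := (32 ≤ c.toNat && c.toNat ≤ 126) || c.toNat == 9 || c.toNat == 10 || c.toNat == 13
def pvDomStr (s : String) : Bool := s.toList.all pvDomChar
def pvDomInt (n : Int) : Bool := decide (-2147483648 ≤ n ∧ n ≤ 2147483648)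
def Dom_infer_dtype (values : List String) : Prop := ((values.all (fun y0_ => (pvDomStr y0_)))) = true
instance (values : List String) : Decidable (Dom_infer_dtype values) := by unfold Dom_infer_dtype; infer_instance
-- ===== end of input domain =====

-- B replaces A's single counting loop (three hand-maintained counters, try/except
-- control flow, final threshold tests) by staged short-circuit passes: all-int?,
-- all-numeric?, then a date tally only among non-numeric values (objective: simpler).

-- Shared primitive (used by both ports, like a library call): Bool test for
-- "float(v) succeeds" (ValueError ↔ false).  PySem has no float parser, so this is a
-- hand port of CPython's float-literal grammar, exact on the ASCII domain:
-- strip whitespace, optional sign, then inf/infinity/nan (case-insensitive) or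
-- digits with single '_' separators, optional '.', optional exponent.

-- consume "(('_')? digit)*" after an initial digit; none = misplaced '_'
def pvUsCont : List Char → Option (List Char)
  | [] => some []
  | c :: cs =>
    if PySem.Chars.isdigit c then pvUsCont cs
    else if c = '_' then
      match cs with
      | d :: cs' => if PySem.Chars.isdigit d then pvUsCont cs' else none
      | [] => none
    else some (c :: cs)

-- consume "digit (('_')? digit)*"; none = no leading digit or misplaced '_'
def pvUsRun (cs : List Char) : Option (List Char) :=
  match cs with
  | c :: cs' => if PySem.Chars.isdigit c then pvUsCont cs' else none
  | [] => none

def pvFloatOk (v : String) : Bool :=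
  -- float() strips the same whitespace as str.strip on the ASCII domain
  let cs0 := (PySem.Str.strip v).toList
  let cs1 := match cs0 with
    | c :: rest => if c = '+' ∨ c = '-' then rest else cs0
    | [] => cs0
  let low := cs1.map PySem.Chars.lowerChar
  if low = "inf".toList ∨ low = "infinity".toList ∨ low = "nan".toList then true
  else
    let (hasInt, rest) := match pvUsRun cs1 with
      | some r => (true, r)
      | none => (false, cs1)
    let (hasFrac, rest2) := match rest with
      | '.' :: r =>
        (match pvUsRun r with
         | some r2 => (true, r2)
         | none => (false, r))
      | _ => (false, rest)
    if !(hasInt || hasFrac) then false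
    else match rest2 with
      | [] => true
      | e :: r3 =>
        if e = 'e' ∨ e = 'E' then
          let r4 := match r3 with
            | s :: r4' => if s = '+' ∨ s = '-' then r4' else r3
            | [] => r3
          match pvUsRun r4 with
          | some [] => true
          | _ => false
        else false

-- ===== PORT A =====
-- A's loop body: try int / try float / date heuristic, updating three counters
def pvStepA (acc : Int × Int × Int) (v : String) : Int × Int × Int :=
  let (i, f, d) := acc
  if (PySem.Int.ofStr? v).isSome then (i + 1, f, d)
  else if pvFloatOk v then (i, f + 1, d)
  else if PySem.Str.len v ≥ 8 && v.toList.contains '-' then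
    let parts := PySem.Chars.splitOn v.toList ['-']
    if (parts.length == 2 || parts.length == 3) && parts.all PySem.Chars.strIsdigit then
      (i, f, d + 1)
    else (i, f, d)
  else (i, f, d)

def infer_dtype (values : List String) : String :=
  let nonEmpty := values.filter (fun v => PySem.Str.strip v != "")
  if nonEmpty.isEmpty then "unknown"
  else
    let c := (nonEmpty.take 50).foldl pvStepA (0, 0, 0)
    let total : Int := (nonEmpty.take 50).length
    if c.1 == total then "integer"
    else if c.1 + c.2.1 == total then "float"
    -- date_count > total * 0.8 : exact integer form, since total ≤ 50 keeps the
    -- double-precision product on the same side of every integer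
    else if 5 * c.2.2 > 4 * total then "date"
    else "string"

-- ===== PORT B =====
def pvIsInt (v : String) : Bool := (PySem.Int.ofStr? v).isSome

def pvIsNumber (v : String) : Bool := pvIsInt v || pvFloatOk v

def pvIsDateish (v : String) : Bool :=
  if PySem.Str.len v ≥ 8 && v.toList.contains '-' then
    let parts := PySem.Chars.splitOn v.toList ['-']
    (parts.length == 2 || parts.length == 3) && parts.all PySem.Chars.strIsdigit
  else false

def infer_dtype_alt (values : List String) : String :=
  let sample := (values.filter (fun v => PySem.Str.strip v != "")).take 50
  if sample.isEmpty then "unknown"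
  else if sample.all pvIsInt then "integer"
  else if sample.all pvIsNumber then "float"
  -- dates > 0.8 * len(sample) : same exact integer form of the threshold as in Source B
  else if 5 * (sample.countP (fun v => !pvIsNumber v && pvIsDateish v) : Int)
            > 4 * (sample.length : Int) then "date"
  else "string"

-- ===== PRECONDITION & SPEC =====
def Spec_infer_dtype (values : List String) (out : String) : Prop := out = infer_dtype_alt values
instance (values : List String) (out : String) : Decidable (Spec_infer_dtype values out) := by unfold Spec_infer_dtype; infer_instance

-- ===== CLAIM (what is proved, stated in full; the proofs are below) =====
def Claim_equal_infer_dtype : Prop := ∀ (values : List String), Dom_infer_dtype values → Spec_infer_dtype values (infer_dtype values)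

-- ===== LEMMAS AND PROOFS =====

-- A's loop body characterised per element
theorem pvStep_char (i f d : Int) (v : String) :
    pvStepA (i, f, d) v =
      (i + (if pvIsInt v then (1 : Int) else 0),
       f + (if !pvIsInt v && pvFloatOk v then (1 : Int) else 0),
       d + (if !pvIsNumber v && pvIsDateish v then (1 : Int) else 0)) := by
  rw [pvStepA]
  by_cases hI : pvIsInt v = true
  · have h' : (PySem.Int.ofStr? v).isSome = true := hI
    simp [h', hI, pvIsNumber]
  · have h' : (PySem.Int.ofStr? v).isSome = false := by simpa [pvIsInt] using hI
    by_cases hF : pvFloatOk v = true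
    · simp [h', hI, hF, pvIsNumber]
    · by_cases hA : (PySem.Str.len v ≥ 8 && v.toList.contains '-') = true
      · simp only [h', hI, hF, hA, pvIsNumber, pvIsDateish, Bool.false_eq_true, if_false,
          if_true, Bool.or_self, Bool.not_false, Bool.true_and]
        split_ifs <;> simp_all
      · have hI2 : ¬((PySem.Int.ofStr? v).isSome = true) := by simp [h']
        have hD : pvIsDateish v = false := by rw [pvIsDateish, if_neg hA]
        rw [if_neg hI2, if_neg hF, if_neg hA]
        simp [pvIsNumber, hI, hF, hD]

-- A's counter fold computes exactly B's three tallies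
theorem pvFold_eq_counts (l : List String) (i f d : Int) :
    l.foldl pvStepA (i, f, d) =
      (i + (l.countP pvIsInt : Int),
       f + (l.countP (fun v => !pvIsInt v && pvFloatOk v) : Int),
       d + (l.countP (fun v => !pvIsNumber v && pvIsDateish v) : Int)) := by
  induction l generalizing i f d with
  | nil => simp
  | cons v t ih =>
    simp only [List.foldl_cons, pvStep_char, List.countP_cons, ih]
    simp only [Prod.mk.injEq]
    refine ⟨?_, ?_, ?_⟩ <;> split_ifs <;> push_cast <;> ring
-- int hits and float hits partition the numeric hits
theorem pvCountP_sum (l : List String) :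
    l.countP pvIsInt + l.countP (fun v => !pvIsInt v && pvFloatOk v)
      = l.countP pvIsNumber := by
  induction l with
  | nil => simp
  | cons v t ih =>
    simp only [List.countP_cons]
    rw [← ih]
    by_cases hI : pvIsInt v = true <;> by_cases hF : pvFloatOk v = true <;>
      simp [pvIsNumber, hI, hF] <;> omega

-- the per-sample if-chains agree
theorem pvChains_eq (l : List String) :
    (let c := l.foldl pvStepA (0, 0, 0);
     let total : Int := l.length;
     if c.1 == total then "integer"
     else if c.1 + c.2.1 == total then "float"
     else if 5 * c.2.2 > 4 * total then "date"
     else "string")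
    = (if l.all pvIsInt then "integer"
       else if l.all pvIsNumber then "float"
       else if 5 * (l.countP (fun v => !pvIsNumber v && pvIsDateish v) : Int)
                 > 4 * (l.length : Int) then "date"
       else "string") := by
  have c1 : ((l.countP pvIsInt : Int) = (l.length : Int)) ↔ (l.all pvIsInt = true) := by
    rw [Nat.cast_inj, List.countP_eq_length, List.all_eq_true]
  have csum := pvCountP_sum l
  have c2 : ((l.countP pvIsInt : Int) + (l.countP (fun v => !pvIsInt v && pvFloatOk v) : Int)
      = (l.length : Int)) ↔ (l.all pvIsNumber = true) := by
    rw [← Nat.cast_add, Nat.cast_inj, csum, List.countP_eq_length, List.all_eq_true]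
  simp only [pvFold_eq_counts, zero_add, beq_iff_eq, c1, c2]

theorem infer_dtype_spec : Claim_equal_infer_dtype := by
  unfold Claim_equal_infer_dtype Spec_infer_dtype
  intro values _
  unfold infer_dtype infer_dtype_alt
  by_cases hne : (values.filter (fun v => PySem.Str.strip v != "")) = []
  · simp [hne]
  · have h1 : (values.filter (fun v => PySem.Str.strip v != "")).isEmpty = false := by
      simp [hne]
    have h2 : ((values.filter (fun v => PySem.Str.strip v != "")).take 50).isEmpty = false := by
      simp [List.take_eq_nil_iff, hne]
    simp only [h1, h2, Bool.false_eq_true, if_false]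
    exact pvChains_eq _
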